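-- pv_equiv track=rewrite | github.com/AmdaU/Projet_Euler | python/#51.py | configurations
-- ===== SOURCE A (Python) =====
-- def toBin(x,puiss):
--     digits = []
--     for i in range(puiss,-1,-1):
--         if(x - 2**i >= 0):
--             digits.append(1)
--             x -= 2**i
--         else:
--             digits.append(0)
--     return digits
--
-- def configurations(x):
--     confs = []
--     outs = []
--     for i in range(1,2**len(x)-1):
--         confs.append(toBin(i,len(x)-1))
--     for i in range(len(confs)):
--         outies = ""
--         for j in range(len(confs[i])):
--             if(confs[i][j]):
--                 outies += x[j]
--             else:
--                 outies += "*"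
--         outs.append(outies)
--     return outs
-- ===== SOURCE B (Python) =====
-- def configurations(x):
--     outs = [""]
--     for c in x:
--         outs = [s + t for s in outs for t in ("*", c)]
--     return outs[1:-1]
-- ===== Notes on version B (the rewrite author's own statement) =====
-- stated objective: simpler
-- what changed: B generates the masked strings directly as the Cartesian product of the per-position choices ('*', x[j]) folded over the string and drops the two endpoint configurations with [1:-1], instead of A's counting i from 1 to 2**n-2 and converting each i to a binary digit list with a greedy power-of-two subtraction before masking.
import Mathlib
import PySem

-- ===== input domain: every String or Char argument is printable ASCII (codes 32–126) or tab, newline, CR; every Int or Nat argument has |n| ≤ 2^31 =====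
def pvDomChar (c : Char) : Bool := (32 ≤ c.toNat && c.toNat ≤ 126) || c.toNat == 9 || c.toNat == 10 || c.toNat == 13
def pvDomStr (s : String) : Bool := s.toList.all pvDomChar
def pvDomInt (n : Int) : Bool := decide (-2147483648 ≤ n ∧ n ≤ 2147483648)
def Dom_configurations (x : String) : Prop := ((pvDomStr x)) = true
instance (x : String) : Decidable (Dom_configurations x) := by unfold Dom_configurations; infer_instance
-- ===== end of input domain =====

-- B builds the masked strings as the Cartesian product of per-position choices ('*', x[j])
-- folded over the string, then drops the two endpoints with [1:-1] — simpler than A's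
-- per-index binary decomposition.  Python strings are represented as List Char inside the
-- ports (String.ofList applied when a string value is produced), which is exact here.

-- ===== PORT A =====
-- the exponent i runs over range(puiss,-1,-1), so i ≥ 0 throughout and 2**i = 2 ^ i.toNat exactly
def pvToBin (x puiss : Int) : List Int :=
  ((PySem.List.pyRange puiss (-1) (-1)).foldl
    (fun (st : List Int × Int) i =>
      if st.2 - 2 ^ i.toNat ≥ 0 then (st.1 ++ [(1 : Int)], st.2 - 2 ^ i.toNat)
      else (st.1 ++ [(0 : Int)], st.2)) ([], x)).1

-- 2**len(x) = 2 ^ x.toList.length (len(x) ≥ 0); confs[i] and x[j] are always indexed in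
-- range in A, so pyGetD with an arbitrary default is exact.
def configurations (x : String) : List String :=
  let confs := (PySem.List.pyRange 1 ((2 : Int) ^ x.toList.length - 1) 1).foldl
    (fun confs i => confs ++ [pvToBin i (PySem.Str.len x - 1)]) []
  (PySem.List.pyRange 0 (PySem.List.len confs) 1).foldl
    (fun outs i =>
      let conf := PySem.List.pyGetD confs i []
      let outies := (PySem.List.pyRange 0 (PySem.List.len conf) 1).foldl
        (fun outies j =>
          if PySem.List.pyGetD conf j 0 ≠ 0 then outies ++ [PySem.List.pyGetD x.toList j ' ']
          else outies ++ ['*']) []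
      outs ++ [String.ofList outies]) []

-- ===== PORT B =====
def configurations_alt (x : String) : List String :=
  let outs := x.toList.foldl
    (fun outs c => outs.flatMap (fun s => [['*'], [c]].map (fun t => s ++ t))) [[]]
  (PySem.List.slice outs (some 1) (some (-1))).map String.ofList

-- ===== PRECONDITION & SPEC =====
def Spec_configurations (x : String) (out : List String) : Prop := out = configurations_alt x
instance (x : String) (out : List String) : Decidable (Spec_configurations x out) := by unfold Spec_configurations; infer_instance

-- ===== CLAIM (what is proved, stated in full; the proofs are below) =====
def Claim_equal_configurations : Prop := ∀ (x : String), Dom_configurations x → Spec_configurations x (configurations x)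

-- ===== LEMMAS AND PROOFS =====

-- the masked string of configuration i: bit (cs.length - 1 - j) of i keeps cs[j], a 0 bit writes '*'
def maskG : List Char → Nat → List Char
  | [], _ => []
  | c :: cs, i => (if 2 ^ cs.length ≤ i then c else '*') :: maskG cs (i % 2 ^ cs.length)

-- the digit list toBin produces, structurally (MSB first)
def digitsN : Nat → Nat → List Int
  | 0, _ => []
  | n + 1, i => (if 2 ^ n ≤ i then (1 : Int) else 0) :: digitsN n (i % 2 ^ n)

theorem pyRange_negone_cons (a b : Int) (h : b < a) :
    PySem.List.pyRange a b (-1) = a :: PySem.List.pyRange (a - 1) b (-1) := by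
  unfold PySem.List.pyRange
  simp only [if_neg (by norm_num : ¬ ((-1 : Int) = 0))]
  norm_num [h]
  by_cases h2 : b < a - 1
  · simp only [if_pos h2]
    have : (a - b).toNat = (a - 1 - b).toNat + 1 := by omega
    rw [this, List.range_succ_eq_map]
    simp only [List.map_cons, List.map_map]
    congr 1
    · simp
    · apply List.map_congr_left; intro k _
      simp only [Function.comp_apply, Nat.succ_eq_add_one]; push_cast; ring
  · simp only [if_neg h2]
    have : (a - b).toNat = 1 := by omega
    simp [this, List.range_succ]

theorem pyRange_negone_nil (a b : Int) (h : a ≤ b) :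
    PySem.List.pyRange a b (-1) = [] := by
  unfold PySem.List.pyRange
  norm_num; intro _; omega

theorem toBin_loop (n : Nat) :
    ∀ (i : Nat) (acc : List Int), i < 2 ^ n →
    (PySem.List.pyRange ((n : Int) - 1) (-1) (-1)).foldl
      (fun (st : List Int × Int) j =>
        if st.2 - 2 ^ j.toNat ≥ 0 then (st.1 ++ [(1 : Int)], st.2 - 2 ^ j.toNat)
        else (st.1 ++ [(0 : Int)], st.2)) (acc, (i : Int))
      = (acc ++ digitsN n i, 0) := by
  induction n with
  | zero =>
    intro i acc h
    have : i = 0 := by omega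
    subst this
    rw [pyRange_negone_nil _ _ (by norm_num)]
    simp [digitsN]
  | succ n ih =>
    intro i acc h
    have hcons : ((n + 1 : Nat) : Int) - 1 = (n : Int) := by push_cast; ring
    rw [hcons, pyRange_negone_cons _ _ (by omega)]
    simp only [List.foldl_cons]
    have ht : ((n : Int)).toNat = n := by simp
    rw [ht]
    have hp : ((2:Int) ^ n) = ((2 ^ n : Nat) : Int) := by push_cast; ring
    by_cases hb : 2 ^ n ≤ i
    · have hcond : (i : Int) - 2 ^ n ≥ 0 := by rw [hp]; omega
      rw [if_pos hcond]
      have hsub : (i : Int) - 2 ^ n = ((i - 2 ^ n : Nat) : Int) := by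
        rw [hp]; omega
      have hmod : i - 2 ^ n = i % 2 ^ n := by
        rw [Nat.mod_eq_sub_mod hb, Nat.mod_eq_of_lt (by have := Nat.pow_succ 2 n; omega)]
      rw [hsub]
      rw [ih (i - 2 ^ n) (acc ++ [1]) (by have := Nat.pow_succ 2 n; omega)]
      simp [digitsN, if_pos hb, hmod]
    · have hcond : ¬ ((i : Int) - 2 ^ n ≥ 0) := by rw [hp]; omega
      rw [if_neg hcond]
      rw [ih i (acc ++ [0]) (by omega)]
      have hmod : i % 2 ^ n = i := Nat.mod_eq_of_lt (by omega)
      simp [digitsN, if_neg hb, hmod]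

theorem pvToBin_eq (n i : Nat) (h : i < 2 ^ n) :
    pvToBin (i : Int) ((n : Int) - 1) = digitsN n i := by
  unfold pvToBin
  rw [toBin_loop n i [] h]
  simp

theorem digitsN_length (n : Nat) : ∀ i, (digitsN n i).length = n := by
  induction n with
  | zero => intro i; simp [digitsN]
  | succ n ih => intro i; simp [digitsN, ih]

theorem render_eq (cs : List Char) :
    ∀ i : Nat, i < 2 ^ cs.length →
    (List.range cs.length).map
      (fun k => if (digitsN cs.length i).getD k 0 ≠ 0 then cs.getD k ' ' else '*')
      = maskG cs i := by
  induction cs with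
  | nil => intro i h; simp [maskG]
  | cons c cs ih =>
    intro i h
    simp only [List.length_cons, List.range_succ_eq_map, List.map_cons, List.map_map]
    rw [maskG]
    congr 1
    · simp only [digitsN, List.getD_cons_zero]
      split_ifs <;> simp_all
    · rw [← ih (i % 2 ^ cs.length) (Nat.mod_lt _ (by positivity))]
      apply List.map_congr_left; intro k _
      simp [digitsN]

theorem dropLast_range (m : Nat) : (List.range m).dropLast = List.range (m - 1) := by
  cases m with
  | zero => simp
  | succ k => rw [List.range_succ]; simp

theorem drop_one_range (m : Nat) : (List.range m).drop 1 = (List.range (m - 1)).map Nat.succ := by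
  cases m with
  | zero => simp
  | succ k => rw [List.range_succ_eq_map]; simp

theorem full_aux (cs : List Char) :
    ∀ init : List (List Char),
    cs.foldl (fun outs c => outs.flatMap (fun s => [['*'], [c]].map (fun t => s ++ t))) init
      = init.flatMap (fun s =>
          (cs.foldl (fun outs c => outs.flatMap (fun s => [['*'], [c]].map (fun t => s ++ t))) [[]]).map
            (fun t => s ++ t)) := by
  induction cs with
  | nil => intro init; simp
  | cons c cs ih =>
    intro init
    simp only [List.foldl_cons]
    rw [ih, ih ([[]].flatMap (fun s => [['*'], [c]].map (fun t => s ++ t)))]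
    simp only [List.flatMap_assoc]
    congr 1
    funext s
    simp [List.map_map, Function.comp_def, List.append_assoc]

theorem full_cons (c : Char) (cs : List Char) :
    (c :: cs).foldl (fun outs c => outs.flatMap (fun s => [['*'], [c]].map (fun t => s ++ t))) [[]]
      = (cs.foldl (fun outs c => outs.flatMap (fun s => [['*'], [c]].map (fun t => s ++ t))) [[]]).map (fun t => '*' :: t)
        ++ (cs.foldl (fun outs c => outs.flatMap (fun s => [['*'], [c]].map (fun t => s ++ t))) [[]]).map (fun t => c :: t) := by
  simp only [List.foldl_cons]
  rw [full_aux cs]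
  simp

theorem full_eq (cs : List Char) :
    cs.foldl (fun outs c => outs.flatMap (fun s => [['*'], [c]].map (fun t => s ++ t))) [[]]
      = (List.range (2 ^ cs.length)).map (maskG cs) := by
  induction cs with
  | nil => simp [maskG]
  | cons c cs ih =>
    rw [full_cons, ih]
    have hrange : List.range (2 ^ (c :: cs).length)
        = List.range (2 ^ cs.length) ++ (List.range (2 ^ cs.length)).map (fun i => 2 ^ cs.length + i) := by
      have h2 : 2 ^ (c :: cs).length = 2 ^ cs.length + 2 ^ cs.length := by
        simp [pow_succ]; ring
      rw [h2, List.range_add]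
    rw [hrange]
    simp only [List.map_append, List.map_map]
    congr 1
    · apply List.map_congr_left; intro k hk
      rw [List.mem_range] at hk
      simp [maskG, Function.comp, Nat.mod_eq_of_lt hk, Nat.not_le.mpr hk]
    · apply List.map_congr_left; intro k hk
      rw [List.mem_range] at hk
      simp [maskG, Function.comp, Nat.add_mod_left, Nat.mod_eq_of_lt hk]

theorem slice_one_negone {α : Type} (xs : List α) :
    PySem.List.slice xs (some 1) (some (-1)) = (xs.dropLast).drop 1 := by
  show List.take (PySem.List.clampIdx xs.length (-1) - PySem.List.clampIdx xs.length 1)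
      (List.drop (PySem.List.clampIdx xs.length 1) xs) = (xs.dropLast).drop 1
  rw [PySem.List.clampIdx_neg_one]
  have h1 : PySem.List.clampIdx xs.length 1 = min 1 xs.length := by
    unfold PySem.List.clampIdx; norm_num
  rw [h1, List.dropLast_eq_take, List.drop_take]
  cases xs with
  | nil => simp
  | cons a l =>
    simp only [List.length_cons]
    have h2 : min 1 (l.length + 1) = 1 := by omega
    rw [h2]

theorem pyRange_mid (n : Nat) :
    PySem.List.pyRange 1 ((2 : Int) ^ n - 1) 1
      = (List.range (2 ^ n - 2)).map (fun k => ((k + 1 : Nat) : Int)) := by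
  have h1 : (1:Nat) ≤ 2 ^ n := Nat.one_le_two_pow
  have h2 : ((2:Int) ^ n) = ((2 ^ n : Nat) : Int) := by push_cast; ring
  unfold PySem.List.pyRange
  norm_num
  by_cases h : (1 : Int) < 2 ^ n - 1
  · simp only [if_pos h]
    have hc2 : ((2:Int) ^ n).toNat - 1 - 1 = 2 ^ n - 2 := by omega
    simp only [hc2]
    apply List.map_congr_left; intro k _; omega
  · simp only [if_neg h]
    have : 2 ^ n - 2 = 0 := by omega
    simp [this]

theorem outs_loop (confs : List (List Int)) (cs : List Char) :
    (PySem.List.pyRange 0 (PySem.List.len confs) 1).foldl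
      (fun outs i =>
        outs ++ [String.ofList
          ((PySem.List.pyRange 0 (PySem.List.len (PySem.List.pyGetD confs i []))).foldl
            (fun outies j =>
              if PySem.List.pyGetD (PySem.List.pyGetD confs i []) j 0 ≠ 0 then
                outies ++ [PySem.List.pyGetD cs j ' ']
              else outies ++ ['*']) [])]) []
    = confs.map (fun conf => String.ofList ((PySem.List.pyRange 0 (PySem.List.len conf) 1).foldl
        (fun outies j =>
          if PySem.List.pyGetD conf j 0 ≠ 0 then outies ++ [PySem.List.pyGetD cs j ' ']
          else outies ++ ['*']) [])) := by
  show (PySem.List.pyRange 0 (PySem.List.len confs) 1).foldl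
      (fun outs i => outs ++ [(fun conf => String.ofList ((PySem.List.pyRange 0 (PySem.List.len conf) 1).foldl
        (fun outies j =>
          if PySem.List.pyGetD conf j 0 ≠ 0 then outies ++ [PySem.List.pyGetD cs j ' ']
          else outies ++ ['*']) [])) (PySem.List.pyGetD confs i [])]) [] = _
  rw [PySem.List.foldl_append_singleton_eq_map]
  simp only [List.nil_append]
  conv_rhs => rw [← PySem.List.map_pyGetD_pyRange_zero confs []]
  rw [List.map_map]
  rfl

theorem outs_loop_probe (x : String) :
    (PySem.List.pyRange 0 (PySem.List.len ((PySem.List.pyRange 1 ((2 : Int) ^ x.toList.length - 1) 1).map (fun i => pvToBin i (PySem.Str.len x - 1)))) 1).foldl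
      (fun outs i =>
        outs ++ [String.ofList
          ((PySem.List.pyRange 0 (PySem.List.len (PySem.List.pyGetD ((PySem.List.pyRange 1 ((2 : Int) ^ x.toList.length - 1) 1).map (fun i => pvToBin i (PySem.Str.len x - 1))) i []))).foldl
            (fun outies j =>
              if PySem.List.pyGetD (PySem.List.pyGetD ((PySem.List.pyRange 1 ((2 : Int) ^ x.toList.length - 1) 1).map (fun i => pvToBin i (PySem.Str.len x - 1))) i []) j 0 ≠ 0 then
                outies ++ [PySem.List.pyGetD x.toList j ' ']
              else outies ++ ['*']) [])]) []
    = (List.range (2 ^ x.toList.length - 2)).map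
          (fun k => String.ofList (maskG x.toList (k + 1))) := by
  rw [outs_loop]
  rw [List.map_map, pyRange_mid x.toList.length, List.map_map]
  apply List.map_congr_left
  intro k hk
  rw [List.mem_range] at hk
  have hklt : k + 1 < 2 ^ x.toList.length := by
    have := Nat.one_le_two_pow (n := x.toList.length); omega
  have hlen : PySem.Str.len x - 1 = ((x.toList.length : Int)) - 1 := by
    rw [PySem.Str.len_eq]
  simp only [Function.comp_apply, hlen]
  rw [pvToBin_eq x.toList.length (k + 1) hklt]
  congr 1
  have hl : PySem.List.len (digitsN x.toList.length (k + 1)) = ((x.toList.length : Nat) : Int) := by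
    unfold PySem.List.len
    rw [digitsN_length]
  rw [hl]
  have hbody : (fun (outies : List Char) (j : Int) =>
      if PySem.List.pyGetD (digitsN x.toList.length (k + 1)) j 0 ≠ 0 then
        outies ++ [PySem.List.pyGetD x.toList j ' ']
      else outies ++ ['*'])
      = (fun outies j => outies ++ [if PySem.List.pyGetD (digitsN x.toList.length (k + 1)) j 0 ≠ 0 then
          PySem.List.pyGetD x.toList j ' ' else '*']) := by
    funext o j; split <;> rfl
  rw [hbody]
  rw [PySem.List.foldl_append_singleton_eq_map
      (fun j => if PySem.List.pyGetD (digitsN x.toList.length (k + 1)) j 0 ≠ 0 then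
          PySem.List.pyGetD x.toList j ' ' else '*')
      (PySem.List.pyRange 0 ((x.toList.length : Int)) 1) []]
  simp only [List.nil_append]
  rw [PySem.List.pyRange_zero_natCast, List.map_map]
  rw [← render_eq x.toList (k + 1) hklt]
  apply List.map_congr_left
  intro j _
  simp [PySem.List.pyGetD_natCast]


theorem configurations_eq_masks (x : String) :
    configurations x
      = (List.range (2 ^ x.toList.length - 2)).map
          (fun k => String.ofList (maskG x.toList (k + 1))) := by
  unfold configurations
  rw [PySem.List.foldl_append_singleton_eq_map (fun i => pvToBin i (PySem.Str.len x - 1))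
      (PySem.List.pyRange 1 ((2 : Int) ^ x.toList.length - 1) 1) []]
  simp only [List.nil_append]
  exact outs_loop_probe x

theorem configurations_alt_eq_masks (x : String) :
    configurations_alt x
      = (List.range (2 ^ x.toList.length - 2)).map
          (fun k => String.ofList (maskG x.toList (k + 1))) := by
  unfold configurations_alt
  show (PySem.List.slice (x.toList.foldl
      (fun outs c => outs.flatMap (fun s => [['*'], [c]].map (fun t => s ++ t))) [[]])
      (some 1) (some (-1))).map String.ofList = _
  rw [full_eq x.toList, slice_one_negone]
  rw [← List.map_dropLast, ← List.map_drop]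
  rw [dropLast_range, drop_one_range, List.map_map, List.map_map]
  have h12 : 2 ^ x.toList.length - 1 - 1 = 2 ^ x.toList.length - 2 := by omega
  rw [h12]
  rfl

-- ===== VERDICT (by name: the statement is the Claim_ definition above) =====
theorem configurations_spec : Claim_equal_configurations := by
  intro x _
  unfold Spec_configurations
  rw [configurations_eq_masks, configurations_alt_eq_masks]
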